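-- pv_equiv track=rewrite | github.com/AshGreyG/Answer-To-Algorithm-Problems | luogu/P1010-2-power.py | represent_with02
-- ===== SOURCE A (Python) =====
-- from typing import List
--
-- def represent_with02(n : int) -> str :
--     if n == 0 :
--         return "2(0)"
--     elif n == 1 :
--         return "2"
--     elif n == 2 :
--         return "2(2)"
--
--     binary = bin(n)[2:]
--
--     indexes : List[int] = []
--     for i in range(len(binary)) :
--         if binary[i] == "1" :
--             indexes.append(len(binary) - 1 - i)
--
--     res = ""
--     for i, idx in enumerate(indexes) :
--         if idx != 0 and idx != 1 and idx != 2 :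
--             res += f"2({represent_with02(idx)})"
--         else :
--             res += represent_with02(idx)
--         if i != len(indexes) - 1 :
--             res += "+"
--     return res
-- ===== SOURCE B (Python) =====
-- def represent_with02(n: int) -> str:
--     if n == 0:
--         return "2(0)"
--     if n == 1:
--         return "2"
--     if n == 2:
--         return "2(2)"
--     # Bottom-up dynamic programming: no recursion. rep[e] is the encoding of e;
--     # the table is filled iteratively for every exponent below n's bit length,
--     # then n itself is rendered from the table.
--     rep = ["2(0)", "2", "2(2)"]
--
--     def expand(m: int) -> str:
--         terms = []
--         b = 0
--         while m:
--             if m & 1: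
--                 terms.append(rep[b] if b < 3 else "2(" + rep[b] + ")")
--             m >>= 1
--             b += 1
--         return "+".join(reversed(terms))
--
--     for e in range(3, n.bit_length()):
--         rep.append(expand(e))
--     return expand(n)
-- ===== Notes on version B (the rewrite author's own statement) =====
-- stated objective: alternative
-- what changed: B replaces A's naive recursion (recursively re-encoding each exponent while scanning bin(n)) by bottom-up dynamic programming: it fills a table rep[0..bit_length-1] of exponent encodings iteratively, each entry rendered by an LSB-first bit loop over the already-built table, then renders n itself from the table; no recursion and no binary string.
-- outside the precondition, e.g. on represent_with02(-1): A returns '2(0)', B raises IndexError; on represent_with02(-5): A returns '2(2)+2(0)', B raises IndexError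
import Mathlib
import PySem

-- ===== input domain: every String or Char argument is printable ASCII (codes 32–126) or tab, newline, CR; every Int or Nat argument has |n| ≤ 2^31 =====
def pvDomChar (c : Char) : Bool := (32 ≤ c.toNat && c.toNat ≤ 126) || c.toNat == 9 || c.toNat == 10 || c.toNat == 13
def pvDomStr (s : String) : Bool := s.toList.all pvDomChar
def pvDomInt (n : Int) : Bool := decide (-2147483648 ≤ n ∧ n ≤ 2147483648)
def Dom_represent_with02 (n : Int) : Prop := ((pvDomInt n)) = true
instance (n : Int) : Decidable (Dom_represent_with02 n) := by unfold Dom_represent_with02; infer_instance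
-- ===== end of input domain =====

-- B replaces A's naive recursion over exponents by bottom-up dynamic programming over a table of
-- exponent encodings; equivalence is proved on the natural domain 0 ≤ n (objective: alternative).

-- ===== PORT A =====

-- binary = bin(n)[2:]
def binDigits (n : Int) : List Char :=
  PySem.List.slice (PySem.Int.toBinChars0b n) (some 2) none

-- indexes: positions (from the right) of the '1' characters of `binary`
def aIndexes (n : Int) : List Int :=
  (PySem.List.pyRange 0 ((binDigits n).length : Int)).foldl
    (fun acc i => if PySem.List.pyGetD (binDigits n) i ' ' == '1'
      then acc ++ [((binDigits n).length : Int) - 1 - i] else acc) []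

theorem binDigits_nonneg (n : Int) (hn : 0 ≤ n) :
    binDigits n = Nat.toDigits 2 n.toNat := by
  unfold binDigits PySem.Int.toBinChars0b
  rw [if_neg (by omega),
    PySem.List.slice_from ('0' :: 'b' :: Nat.toDigits 2 n.toNat) (a := 2) (by norm_num)]
  rfl

theorem binDigits_neg (n : Int) (hn : n < 0) :
    binDigits n = 'b' :: Nat.toDigits 2 n.natAbs := by
  unfold binDigits PySem.Int.toBinChars0b
  rw [if_pos hn,
    PySem.List.slice_from ('-' :: '0' :: 'b' :: Nat.toDigits 2 n.natAbs) (a := 2) (by norm_num)]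
  rfl

-- Every collected index is nonnegative and below the digit-string length (cited by `decreasing_by`).
theorem aIndexes_mem_bound (n : Int) :
    ∀ idx ∈ aIndexes n, 0 ≤ idx ∧ idx < ((binDigits n).length : Int) := by
  intro idx h
  unfold aIndexes at h
  rw [PySem.List.foldl_append_if] at h
  simp only [List.nil_append, List.mem_map, List.mem_filter] at h
  obtain ⟨i, ⟨hi, _⟩, rfl⟩ := h
  rw [PySem.List.mem_pyRange_one] at hi
  omega

-- The digit string is short: ≤ n for positive n, ≤ |n| + 1 for negative n (cited by `decreasing_by`).
theorem binDigits_len_le (n : Int) (hn : n ≠ 0) :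
    ((binDigits n).length : Int) ≤ if n < 0 then (n.natAbs : Int) + 1 else n := by
  by_cases h : n < 0
  · rw [if_pos h, binDigits_neg n h]
    have h1 : (Nat.toDigits 2 n.natAbs).length ≤ n.natAbs :=
      (Nat.length_toDigits_le_iff (by norm_num) (by omega)).mpr Nat.lt_two_pow_self
    simp only [List.length_cons]
    omega
  · rw [if_neg h, binDigits_nonneg n (by omega)]
    have h1 : (Nat.toDigits 2 n.toNat).length ≤ n.toNat :=
      (Nat.length_toDigits_le_iff (by norm_num) (by omega)).mpr Nat.lt_two_pow_self
    omega

-- measure decrease for A's recursion (cited by `decreasing_by`)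
theorem aIndexes_measure (n idx : Int) (hn : n ≠ 0) (h : idx ∈ aIndexes n) :
    idx.natAbs * 2 + (if idx < 0 then 4 else 0) < n.natAbs * 2 + (if n < 0 then 4 else 0) := by
  obtain ⟨h0, h1⟩ := aIndexes_mem_bound n idx h
  have h2 := binDigits_len_le n hn
  rw [if_neg (by omega : ¬ (idx < 0))]
  by_cases hneg : n < 0
  · rw [if_pos hneg] at h2 ⊢; omega
  · rw [if_neg hneg] at h2 ⊢; omega

def represent_with02 (n : Int) : String :=
  if n = 0 then "2(0)"
  else if n = 1 then "2"
  else if n = 2 then "2(2)"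
  else
    (PySem.List.enumerate (aIndexes n).attach 0).foldl
      (fun res p =>
        let res := res ++ (if p.2.1 ≠ 0 ∧ p.2.1 ≠ 1 ∧ p.2.1 ≠ 2
          then "2(" ++ represent_with02 p.2.1 ++ ")"
          else represent_with02 p.2.1)
        if p.1 ≠ ((aIndexes n).length : Int) - 1 then res ++ "+" else res) ""
termination_by n.natAbs * 2 + (if n < 0 then 4 else 0)
decreasing_by
  all_goals exact aIndexes_measure n p.2.1 (by assumption) p.2.2

-- ===== PORT B =====

-- Source B's inner `while m:` loop, collecting the rendered terms LSB-first.  The loop variable m is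
-- ported at type Nat: exact for nonnegative m (all the loop sees under Pre_, since Source B's caller
-- passes n ≥ 3 and exponents); on negative n (outside Pre_) the Python loop raises IndexError.
def expandLoop (rep : List String) (m b : Nat) : List String :=
  if m = 0 then []
  else
    (if m % 2 = 1
      then [if b < 3 then rep.getD b "" else "2(" ++ rep.getD b "" ++ ")"] else [])
      ++ expandLoop rep (m / 2) (b + 1)
termination_by m
decreasing_by omega

-- Source B's `expand`: "+".join(reversed(terms)); rep[b] is in range by construction, ported as getD.
def expandB (rep : List String) (m : Nat) : String :=
  PySem.Str.join "+" (expandLoop rep m 0).reverse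

-- Source B's for-loop: for e in range(3, n.bit_length()): rep.append(expand(e)),
-- parameterised by the iteration count c = bit_length - 3.
def buildRep (c : Nat) : List String :=
  (List.range' 3 c).foldl (fun rep e => rep ++ [expandB rep e]) ["2(0)", "2", "2(2)"]

def represent_with02_alt (n : Int) : String :=
  if n = 0 then "2(0)"
  else if n = 1 then "2"
  else if n = 2 then "2(2)"
  else expandB (buildRep (n.toNat.size - 3)) n.toNat   -- Nat.size = Python int.bit_length for n ≥ 0

-- ===== PRECONDITION & SPEC =====
-- Pre_ restricts to the natural domain of this power-of-two encoding (nonnegative n): for negative n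
-- A's 'bin(n)[2:]' keeps a stray 'b' from the '-0b' prefix and the returned string is an accident of
-- the implementation (e.g. A(-1) = "2(0)"); B's table indexing raises IndexError there.
def Pre_represent_with02 (n : Int) : Prop := 0 ≤ n
instance (n : Int) : Decidable (Pre_represent_with02 n) := by unfold Pre_represent_with02; infer_instance
def pvWitness_represent_with02 : Int := (11)

def Spec_represent_with02 (n : Int) (out : String) : Prop := out = represent_with02_alt n
instance (n : Int) (out : String) : Decidable (Spec_represent_with02 n out) := by unfold Spec_represent_with02; infer_instance

-- ===== CLAIM (what is proved, stated in full; the proofs are below) =====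
def Claim_equal_represent_with02 : Prop := ∀ (n : Int), Dom_represent_with02 n → Pre_represent_with02 n → Spec_represent_with02 n (represent_with02 n)

-- ===== LEMMAS AND PROOFS =====

-- Reference value: the positions of the set bits of m, in descending order.
def posDesc (m : Nat) : List Nat :=
  if m = 0 then []
  else (posDesc (m / 2)).map (· + 1) ++ (if m % 2 = 1 then [0] else [])
termination_by m
decreasing_by omega

-- Ascending counterpart (LSB first), the order in which expandLoop emits terms.
def posAsc (m : Nat) : List Nat :=
  if m = 0 then []
  else (if m % 2 = 1 then [0] else []) ++ (posAsc (m / 2)).map (· + 1)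
termination_by m
decreasing_by omega

theorem posAsc_reverse (m : Nat) : (posAsc m).reverse = posDesc m := by
  induction m using Nat.strong_induction_on with
  | _ m IH =>
    by_cases hm : m = 0
    · subst hm; rw [posAsc, posDesc]; simp
    · rw [posAsc, if_neg hm, posDesc, if_neg hm, List.reverse_append,
        show ((posAsc (m / 2)).map (· + 1)).reverse = ((posAsc (m / 2)).reverse).map (· + 1)
          from (List.map_reverse ..).symm,
        IH (m / 2) (by omega)]
      by_cases h : m % 2 = 1 <;> simp [h]

-- Nat-level shape of A's index collection, over an arbitrary digit string.
def idxPos (L : List Char) : List Nat :=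
  ((List.range L.length).filter (fun k => L.getD k ' ' == '1')).map
    (fun k => L.length - 1 - k)

theorem idxPos_append_one (L : List Char) (c : Char) :
    idxPos (L ++ [c]) = (idxPos L).map (· + 1) ++ (if c == '1' then [0] else []) := by
  unfold idxPos
  rw [List.length_append, List.length_singleton, List.range_succ, List.filter_append]
  have hfc : List.filter (fun k => (L ++ [c]).getD k ' ' == '1') (List.range L.length)
           = List.filter (fun k => L.getD k ' ' == '1') (List.range L.length) := by
    apply List.filter_congr
    intro k hk
    rw [List.getD_append _ _ _ _ (List.mem_range.mp hk)]
  have hgd : (L ++ [c]).getD L.length ' ' = c := by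
    rw [List.getD_append_right _ _ _ _ (le_refl _)]
    simp
  rw [hfc, List.map_append]
  congr 1
  · rw [List.map_map]
    apply List.map_congr_left
    intro k hk
    have hk' : k < L.length := List.mem_range.mp (List.mem_filter.mp hk).1
    simp only [Function.comp_apply]
    omega
  · by_cases hc : c == '1'
    · rw [if_pos hc]
      have h1 : List.filter (fun k => (L ++ [c]).getD k ' ' == '1') [L.length] = [L.length] := by
        simp [hc]
      rw [h1]
      simp
    · rw [if_neg hc]
      have h1 : List.filter (fun k => (L ++ [c]).getD k ' ' == '1') [L.length] = [] := by
        simp only [List.filter_cons, hgd]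
        simp [hc]
      rw [h1, List.map_nil]

theorem idxPos_toDigits_eq_posDesc (m : Nat) : idxPos (Nat.toDigits 2 m) = posDesc m := by
  induction m using Nat.strong_induction_on with
  | _ m IH =>
    by_cases hm : m < 2
    · interval_cases m
      · rw [show posDesc 0 = [] by simp [posDesc]]; decide
      · rw [show posDesc 1 = [0] by simp [posDesc]]; decide
    · have htd := Nat.toDigits_of_base_le (b := 2) (n := m) (by norm_num) (by omega)
      have hpd : posDesc m = (posDesc (m / 2)).map (· + 1)
          ++ (if m % 2 = 1 then [0] else []) := by
        conv_lhs => rw [posDesc]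
        rw [if_neg (by omega)]
      rw [htd, idxPos_append_one, IH (m / 2) (by omega), hpd]
      congr 1
      rcases Nat.mod_two_eq_zero_or_one m with h | h <;> rw [h] <;> decide

theorem aIndexes_eq_cast_idxPos (n : Int) (hn : 0 ≤ n) :
    aIndexes n = (idxPos (Nat.toDigits 2 n.toNat)).map (fun k : Nat => (k : Int)) := by
  unfold aIndexes
  rw [PySem.List.foldl_append_if, List.nil_append, binDigits_nonneg n hn]
  rw [PySem.List.pyRange_zero_natCast]
  unfold idxPos
  conv_lhs => rw [List.filter_map, List.map_map]
  conv_rhs => rw [List.map_map]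
  rw [List.filter_congr (q := fun k => (Nat.toDigits 2 n.toNat).getD k ' ' == '1')
    (by intro k hk; simp [Function.comp, PySem.List.pyGetD_natCast])]
  apply List.map_congr_left
  intro k hk
  have hk' : k < (Nat.toDigits 2 n.toNat).length :=
    List.mem_range.mp (List.mem_filter.mp hk).1
  simp only [Function.comp_apply]
  omega

-- every set-bit position of m carries weight: 2^b ≤ m
theorem mem_posDesc_pow_le (m : Nat) : ∀ b ∈ posDesc m, 2 ^ b ≤ m := by
  induction m using Nat.strong_induction_on with
  | _ m IH =>
    intro b hb
    by_cases hm : m = 0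
    · subst hm; rw [posDesc] at hb; simp at hb
    · rw [posDesc, if_neg hm] at hb
      rcases List.mem_append.mp hb with h | h
      · obtain ⟨b', hb', rfl⟩ := List.mem_map.mp h
        have := IH (m / 2) (by omega) b' hb'
        have hp : 2 ^ (b' + 1) = 2 ^ b' * 2 := pow_succ 2 b'
        omega
      · have hb0 : b = 0 := by
          by_cases h2 : m % 2 = 1 <;> simp [h2] at h
          exact h
        subst hb0; simpa using Nat.one_le_iff_ne_zero.mpr hm

theorem mem_posDesc_lt_size (m : Nat) (b : Nat) (hb : b ∈ posDesc m) : b < m.size := by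
  have h1 := mem_posDesc_pow_le m b hb
  have h2 : m < 2 ^ m.size := Nat.lt_size_self m
  exact (Nat.pow_lt_pow_iff_right (a := 2) one_lt_two).mp (by omega)

-- "+".join at the String level
theorem str_join_nil : PySem.Str.join "+" [] = "" := by
  rw [← String.toList_inj, PySem.Str.toList_join]
  simp [PySem.Chars.join_nil]

theorem str_join_singleton (x : String) : PySem.Str.join "+" [x] = x := by
  rw [← String.toList_inj, PySem.Str.toList_join]
  simp [PySem.Chars.join_singleton]

theorem str_join_cons (x y : String) (L : List String) :
    PySem.Str.join "+" (x :: y :: L) = x ++ "+" ++ PySem.Str.join "+" (y :: L) := by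
  rw [← String.toList_inj]
  simp [PySem.Str.toList_join, String.toList_append, PySem.Chars.join_cons_cons]

-- A's manual "+"-separator loop is "+".join of the mapped terms.
theorem sepFold_eq_join {α : Type} (f : α → String) (N : Int) :
    ∀ (L : List α) (s : Int) (acc : String), s + (L.length : Int) = N →
    (PySem.List.enumerate L s).foldl
      (fun res p =>
        let res := res ++ f p.2
        if p.1 ≠ N - 1 then res ++ "+" else res) acc
    = acc ++ PySem.Str.join "+" (L.map f) := by
  intro L
  induction L with
  | nil =>
    intro s acc h
    simp [PySem.List.enumerate_nil, str_join_nil]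
  | cons x L IH =>
    intro s acc h
    rw [PySem.List.enumerate_cons, List.foldl_cons]
    cases L with
    | nil =>
      have hs : s = N - 1 := by simp at h; omega
      show (PySem.List.enumerate ([] : List α) (s + 1)).foldl _
          (if s ≠ N - 1 then acc ++ f x ++ "+" else acc ++ f x) = _
      rw [if_neg (not_not_intro hs), PySem.List.enumerate_nil, List.foldl_nil,
        List.map_cons, List.map_nil, str_join_singleton]
    | cons y L' =>
      have hs : s ≠ N - 1 := by simp at h; omega
      show (PySem.List.enumerate (y :: L') (s + 1)).foldl _
          (if s ≠ N - 1 then acc ++ f x ++ "+" else acc ++ f x) = _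
      rw [if_pos hs, IH (s + 1) (acc ++ f x ++ "+") (by simp at h ⊢; omega)]
      simp only [List.map_cons]
      rw [str_join_cons]
      simp [String.append_assoc]

-- the term-rendering functions (proof-side names for the ports' inline expressions)
def termAfun (e : Int) : String :=
  if e ≠ 0 ∧ e ≠ 1 ∧ e ≠ 2 then "2(" ++ represent_with02 e ++ ")" else represent_with02 e

def termBfun (rep : List String) (b : Nat) : String :=
  if b < 3 then rep.getD b "" else "2(" ++ rep.getD b "" ++ ")"

-- A's general branch, as "+".join over the descending set-bit positions
theorem A_char (n : Int) (hn : 0 ≤ n) (h0 : n ≠ 0) (h1 : n ≠ 1) (h2 : n ≠ 2) :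
    represent_with02 n
      = PySem.Str.join "+" ((posDesc n.toNat).map (fun b : Nat => termAfun (b : Int))) := by
  have hA : represent_with02 n
      = "" ++ PySem.Str.join "+" (((aIndexes n).attach).map (fun p => termAfun p.1)) := by
    conv_lhs => rw [represent_with02]
    rw [if_neg h0, if_neg h1, if_neg h2]
    exact sepFold_eq_join (fun q : {x // x ∈ aIndexes n} => termAfun q.1)
      ((aIndexes n).length : Int) (aIndexes n).attach 0 "" (by simp)
  rw [hA, String.empty_append]
  have hmap : ((aIndexes n).attach).map (fun p => termAfun p.1)
      = (aIndexes n).map termAfun := List.attach_map_val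
  rw [hmap, aIndexes_eq_cast_idxPos n hn, idxPos_toDigits_eq_posDesc, List.map_map]
  rfl

-- B's bit loop, as the mapped list of ascending set-bit positions
theorem expandLoop_eq (rep : List String) :
    ∀ m b, expandLoop rep m b = (posAsc m).map (fun p => termBfun rep (p + b)) := by
  intro m
  induction m using Nat.strong_induction_on with
  | _ m IH =>
    intro b
    by_cases hm : m = 0
    · subst hm; rw [expandLoop, posAsc]; simp
    · rw [expandLoop, if_neg hm, posAsc, if_neg hm, List.map_append, List.map_map,
        IH (m / 2) (by omega) (b + 1)]
      congr 1
      · by_cases h2 : m % 2 = 1 <;> simp [h2, termBfun]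
      · apply List.map_congr_left
        intro p _
        simp only [Function.comp_apply]
        congr 1
        omega

theorem expandB_eq_join (rep : List String) (m : Nat) :
    expandB rep m = PySem.Str.join "+" ((posDesc m).map (termBfun rep)) := by
  unfold expandB
  rw [expandLoop_eq, ← List.map_reverse, posAsc_reverse]
  simp only [Nat.add_zero]

-- Core correctness of Source B's expand: over a table whose entries are A's encodings of their index,
-- expand m reproduces A's general-branch output.
theorem expandB_eq_A (rep : List String)
    (hrep : ∀ k : Nat, k < rep.length → rep.getD k "" = represent_with02 (k : Int))
    (m : Nat) (hm : 3 ≤ m) (hsz : m.size ≤ rep.length) :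
    expandB rep m = represent_with02 (m : Int) := by
  rw [expandB_eq_join,
    A_char (m : Int) (by positivity) (by omega) (by omega) (by omega),
    Int.toNat_natCast]
  congr 1
  apply List.map_congr_left
  intro b hb
  have hblt : b < rep.length := lt_of_lt_of_le (mem_posDesc_lt_size m b hb) hsz
  unfold termBfun termAfun
  rw [hrep b hblt]
  by_cases h3 : b < 3
  · rw [if_pos h3, if_neg (by omega)]
  · rw [if_neg h3, if_pos (by constructor <;> [omega; constructor <;> omega])]

-- table invariant: buildRep c has length 3 + c and its entries are A's encodings
theorem buildRep_spec (c : Nat) :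
    (buildRep c).length = 3 + c ∧
    ∀ k : Nat, k < 3 + c → (buildRep c).getD k "" = represent_with02 (k : Int) := by
  induction c with
  | zero =>
    refine ⟨rfl, ?_⟩
    intro k hk
    interval_cases k
    · rw [show ((0 : Nat) : Int) = 0 from by norm_num,
        show represent_with02 0 = "2(0)" from by rw [represent_with02]; norm_num]; rfl
    · rw [show ((1 : Nat) : Int) = 1 from by norm_num,
        show represent_with02 1 = "2" from by rw [represent_with02]; norm_num]; rfl
    · rw [show ((2 : Nat) : Int) = 2 from by norm_num,
        show represent_with02 2 = "2(2)" from by rw [represent_with02]; norm_num]; rfl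
  | succ c IH =>
    obtain ⟨hlen, hval⟩ := IH
    have hstep : buildRep (c + 1) = buildRep c ++ [expandB (buildRep c) (3 + c)] := by
      unfold buildRep
      rw [List.range'_concat, List.foldl_append, one_mul]
      simp [List.foldl_cons, List.foldl_nil]
    have hnew : expandB (buildRep c) (3 + c) = represent_with02 ((3 + c : Nat) : Int) := by
      apply expandB_eq_A (buildRep c) (fun k hk => hval k (hlen ▸ hk)) (3 + c) (by omega)
      rw [hlen]
      exact Nat.size_le.mpr (lt_of_lt_of_le Nat.lt_two_pow_self (le_refl _))
    refine ⟨by rw [hstep, List.length_append, hlen]; simp; omega, ?_⟩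
    intro k hk
    by_cases hk' : k < 3 + c
    · rw [hstep, List.getD_append _ _ _ _ (by omega), hval k hk']
    · have hke : k = 3 + c := by omega
      subst hke
      rw [hstep, List.getD_append_right _ _ _ _ (by omega), hlen]
      simpa using hnew

theorem represent_with02_eq_alt (n : Int) (hn : 0 ≤ n) :
    represent_with02 n = represent_with02_alt n := by
  by_cases h0 : n = 0
  · subst h0; rw [represent_with02, represent_with02_alt]; norm_num
  by_cases h1 : n = 1
  · subst h1; rw [represent_with02, represent_with02_alt]; norm_num
  by_cases h2 : n = 2
  · subst h2; rw [represent_with02, represent_with02_alt]; norm_num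
  have hn3 : 3 ≤ n.toNat := by omega
  obtain ⟨hlen, hval⟩ := buildRep_spec (n.toNat.size - 3)
  have hB : represent_with02_alt n = expandB (buildRep (n.toNat.size - 3)) n.toNat := by
    rw [represent_with02_alt, if_neg h0, if_neg h1, if_neg h2]
  rw [hB, expandB_eq_A _ (fun k hk => hval k (hlen ▸ hk)) n.toNat hn3 (by rw [hlen]; omega),
    Int.toNat_of_nonneg hn]

-- ===== VERDICT (by name: the statement is the Claim_ definition above) =====
theorem represent_with02_spec : Claim_equal_represent_with02 := by
  intro n _ hpre
  unfold Spec_represent_with02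
  exact represent_with02_eq_alt n hpre
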